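-- pv_equiv track=rewrite | github.com/alexeyprokhorov86-droid/Just | tools/vision_upd.py | _inn_near_our
-- ===== SOURCE A (Python) =====
-- def _inn_near_our(inn: str, our: set[str], max_diff: int = 1) -> str | None:
--     """Fuzzy-match ИНН: если OCR ошибся в 1 цифре среди наших 8 организаций —
--     возвращает правильный ИНН. Длина должна совпадать (10 или 12)."""
--     if not inn:
--         return None
--     matches = []
--     for o in our:
--         if len(o) != len(inn):
--             continue
--         diff = sum(1 for a, b in zip(inn, o) if a != b)
--         if 0 < diff <= max_diff:
--             matches.append((diff, o))
--     if not matches: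
--         return None
--     matches.sort()
--     # Возвращаем только если ближайший match уникален (diff меньше второго)
--     if len(matches) == 1 or matches[0][0] < matches[1][0]:
--         return matches[0][1]
--     return None
-- ===== SOURCE B (Python) =====
-- def _inn_near_our(inn: str, our: set[str], max_diff: int = 1) -> str | None:
--     """Single pass: track the best (smallest) diff, the org that achieved it,
--     and how many candidates share it; answer only a unique best."""
--     if not inn:
--         return None
--     best = None          # (best_diff, best_o)
--     count = 0            # candidates at best_diff
--     for o in our:
--         if len(o) != len(inn):
--             continue
--         diff = sum(1 for a, b in zip(inn, o) if a != b)
--         if not (0 < diff <= max_diff):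
--             continue
--         if best is None or diff < best[0]:
--             best = (diff, o)
--             count = 1
--         elif diff == best[0]:
--             count += 1
--     if best is not None and count == 1:
--         return best[1]
--     return None
-- ===== Notes on version B (the rewrite author's own statement) =====
-- stated objective: simpler
-- what changed: B replaces A's collect-all-matches-then-sort-and-inspect-the-first-two approach by a single pass that tracks the smallest diff, the org achieving it and the number of ties, answering only a unique minimum.
import Mathlib
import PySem

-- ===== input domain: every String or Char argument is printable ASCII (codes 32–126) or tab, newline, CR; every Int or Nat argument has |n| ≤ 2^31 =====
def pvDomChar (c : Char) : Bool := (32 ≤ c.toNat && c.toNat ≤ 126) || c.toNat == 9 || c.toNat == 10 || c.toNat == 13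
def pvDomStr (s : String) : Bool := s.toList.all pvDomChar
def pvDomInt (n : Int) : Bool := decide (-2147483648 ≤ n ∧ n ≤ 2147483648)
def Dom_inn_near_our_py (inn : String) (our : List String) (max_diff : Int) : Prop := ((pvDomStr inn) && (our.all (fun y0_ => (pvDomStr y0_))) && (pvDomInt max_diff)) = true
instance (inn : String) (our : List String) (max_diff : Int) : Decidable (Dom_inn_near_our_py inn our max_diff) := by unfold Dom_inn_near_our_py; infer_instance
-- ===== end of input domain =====

-- B replaces A's collect-then-sort-then-inspect-first-two with a single pass tracking
-- the minimum diff, its first achiever and the tie count (objective: simpler).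


-- ===== PORT A =====
-- shared helper: sum(1 for a, b in zip(inn, o) if a != b), written identically in both Pythons
def pvHamming (inn o : List Char) : Int :=
  (inn.zip o).foldl (fun c p => if p.1 ≠ p.2 then c + 1 else c) 0

-- A: collect (diff, o) pairs, sort them (Python tuple order = lex on (Int, String)),
-- return ms[0][1] iff the minimal diff is unique.  'our' is a Python set, but the
-- result is iteration-order independent, so the List order is immaterial.
def inn_near_our_py (inn : String) (our : List String) (max_diff : Int) : Option String :=
  if inn.toList = [] then none
  else
    let ms := our.foldl (fun acc o =>
      if PySem.Str.len o ≠ PySem.Str.len inn then acc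
      else
        let diff := pvHamming inn.toList o.toList
        if 0 < diff ∧ diff ≤ max_diff then acc ++ [(diff, o)] else acc) []
    if ms = [] then none
    else
      match PySem.List.sorted2 ms (fun p => p.1) (fun p => p.2) with
      | [] => none                                   -- unreachable: ms ≠ []
      | [p] => some p.2                              -- len(ms) == 1
      | p :: q :: _ => if p.1 < q.1 then some p.2 else none

-- ===== PORT B =====
-- B's loop body after the two guards: update (best, count)
def pvStep (st : Option (Int × String) × Int) (p : Int × String) : Option (Int × String) × Int :=
  match st.1 with
  | none => (some p, 1)
  | some (bd, _) =>
    if p.1 < bd then (some p, 1)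
    else if p.1 = bd then (st.1, st.2 + 1)
    else st

def inn_near_our_py_alt (inn : String) (our : List String) (max_diff : Int) : Option String :=
  if inn.toList = [] then none
  else
    let st := our.foldl (fun st o =>
      if PySem.Str.len o ≠ PySem.Str.len inn then st
      else
        let diff := pvHamming inn.toList o.toList
        if ¬ (0 < diff ∧ diff ≤ max_diff) then st
        else pvStep st (diff, o)) ((none : Option (Int × String)), (0 : Int))
    match st.1 with
    | some (_, o) => if st.2 = 1 then some o else none
    | none => none

-- ===== PRECONDITION & SPEC =====
def Spec_inn_near_our_py (inn : String) (our : List String) (max_diff : Int) (out : Option String) : Prop := out = inn_near_our_py_alt inn our max_diff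
instance (inn : String) (our : List String) (max_diff : Int) (out : Option String) : Decidable (Spec_inn_near_our_py inn our max_diff out) := by unfold Spec_inn_near_our_py; infer_instance

-- ===== CLAIM (what is proved, stated in full; the proofs are below) =====
def Claim_equal_inn_near_our_py : Prop := ∀ (inn : String) (our : List String) (max_diff : Int), Dom_inn_near_our_py inn our max_diff → Spec_inn_near_our_py inn our max_diff (inn_near_our_py inn our max_diff)

-- ===== LEMMAS AND PROOFS =====

-- the candidate test both loops apply to o
def pvCond (inn : String) (max_diff : Int) (o : String) : Bool :=
  PySem.Str.len o = PySem.Str.len inn ∧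
    (0 < pvHamming inn.toList o.toList ∧ pvHamming inn.toList o.toList ≤ max_diff)

-- A's accumulation = map over the filtered candidates
lemma pvA_ms (inn : String) (max_diff : Int) (our : List String)
    (acc : List (Int × String)) :
    our.foldl (fun acc o =>
      if PySem.Str.len o ≠ PySem.Str.len inn then acc
      else
        let diff := pvHamming inn.toList o.toList
        if 0 < diff ∧ diff ≤ max_diff then acc ++ [(diff, o)] else acc) acc
    = acc ++ (our.filter (pvCond inn max_diff)).map
        (fun o => (pvHamming inn.toList o.toList, o)) := by
  induction our generalizing acc with
  | nil => simp
  | cons o t ih =>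
    rw [List.foldl_cons, ih, List.filter_cons]
    by_cases h1 : o.length = inn.length <;>
      by_cases h2 : 0 < pvHamming inn.toList o.toList ∧ pvHamming inn.toList o.toList ≤ max_diff <;>
      simp [pvCond, h1, h2]

-- B's accumulation = fold of pvStep over the same mapped candidate list
lemma pvB_fold (inn : String) (max_diff : Int) (our : List String)
    (st : Option (Int × String) × Int) :
    our.foldl (fun st o =>
      if PySem.Str.len o ≠ PySem.Str.len inn then st
      else
        let diff := pvHamming inn.toList o.toList
        if ¬ (0 < diff ∧ diff ≤ max_diff) then st
        else pvStep st (diff, o)) st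
    = ((our.filter (pvCond inn max_diff)).map
        (fun o => (pvHamming inn.toList o.toList, o))).foldl pvStep st := by
  induction our generalizing st with
  | nil => simp
  | cons o t ih =>
    rw [List.foldl_cons, ih, List.filter_cons]
    by_cases h1 : o.length = inn.length <;>
      by_cases h2 : 0 < pvHamming inn.toList o.toList ∧ pvHamming inn.toList o.toList ≤ max_diff <;>
      simp [pvCond, h1, h2]

-- invariant of B's fold state over a processed pair list L
def pvInv : Option (Int × String) × Int → List (Int × String) → Prop
  | (none, c), L => L = [] ∧ c = 0
  | (some (m, w), c), L =>
      (m, w) ∈ L ∧ (∀ q ∈ L, m ≤ q.1) ∧ c = (L.countP (fun q => q.1 = m) : Int)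

lemma pvInv_foldl (L : List (Int × String)) : pvInv (L.foldl pvStep (none, 0)) L := by
  induction L using List.reverseRecOn with
  | nil => simp [pvInv]
  | append_singleton M p ih =>
    rw [List.foldl_append, List.foldl_cons, List.foldl_nil]
    rcases hst : M.foldl pvStep (none, 0) with ⟨b, c⟩
    rw [hst] at ih
    match b, ih with
    | none, ⟨hM, hc⟩ =>
      subst hM hc
      simp [pvStep, pvInv]
    | some (m, w), ⟨hmem, hmin, hc⟩ =>
      simp only [pvStep]
      by_cases hlt : p.1 < m
      · simp only [hlt, if_pos]
        refine ⟨by simp, ?_, ?_⟩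
        · intro q hq
          rcases List.mem_append.mp hq with h | h
          · exact le_trans (le_of_lt hlt) (hmin q h)
          · simp at h; subst h; omega
        · have : M.countP (fun q => q.1 = p.1) = 0 := by
            rw [List.countP_eq_zero]
            intro q hq
            have := hmin q hq
            simp only [decide_eq_true_eq]
            omega
          simp [List.countP_append, this]
      · by_cases heq : p.1 = m
        · simp only [if_neg hlt, if_pos heq]
          refine ⟨List.mem_append_left _ hmem, ?_, ?_⟩
          · intro q hq
            rcases List.mem_append.mp hq with h | h
            · exact hmin q h
            · simp at h; subst h; omega
          · simp [List.countP_append, heq, hc]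
        · simp only [if_neg hlt, if_neg heq]
          refine ⟨List.mem_append_left _ hmem, ?_, ?_⟩
          · intro q hq
            rcases List.mem_append.mp hq with h | h
            · exact hmin q h
            · simp at h; subst h; omega
          · simp [List.countP_append, heq, hc]

-- the boolean lex order sorted2 inserts with, specialised to (Int, String)
-- sorted2 with reverse = false is exactly the insertBy fold of its lex test
lemma pvSorted2_eq (L : List (Int × String)) :
    PySem.List.sorted2 L (fun p => p.1) (fun p => p.2) false
    = L.foldl (fun acc x => PySem.List.insertBy
        (fun a b => decide (a.1 < b.1) || (!decide (b.1 < a.1) && decide (a.2 < b.2))) x acc) [] := rfl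

-- inserting keeps the list Pairwise-nondecreasing in the first component
lemma pvPairwise_insertBy (x : Int × String) (acc : List (Int × String))
    (h : acc.Pairwise (fun a b => a.1 ≤ b.1)) :
    (PySem.List.insertBy
        (fun a b => decide (a.1 < b.1) || (!decide (b.1 < a.1) && decide (a.2 < b.2))) x acc).Pairwise
      (fun a b => a.1 ≤ b.1) := by
  induction acc with
  | nil => simp [PySem.List.insertBy]
  | cons y ys ih =>
    rw [PySem.List.insertBy]
    by_cases hb : (decide (x.1 < y.1) || (!decide (y.1 < x.1) && decide (x.2 < y.2))) = true
    · rw [if_pos hb]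
      have hxy : x.1 ≤ y.1 := by
        rcases Bool.or_eq_true_iff.mp hb with h1 | h1
        · exact le_of_lt (of_decide_eq_true h1)
        · have := (Bool.and_eq_true_iff.mp h1).1
          simp at this; omega
      refine List.Pairwise.cons ?_ h
      intro z hz
      rcases hz with _ | hz
      · exact hxy
      · exact le_trans hxy ((List.pairwise_cons.mp h).1 z (by assumption))
    · rw [if_neg hb]
      have hyx : y.1 ≤ x.1 := by
        have h1 : ¬ x.1 < y.1 := by
          intro hc
          exact hb (Bool.or_eq_true_iff.mpr (Or.inl (decide_eq_true hc)))
        omega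
      rcases List.pairwise_cons.mp h with ⟨hy, hys⟩
      refine List.pairwise_cons.mpr ⟨?_, ih hys⟩
      intro z hz
      rcases (PySem.List.mem_insertBy _ _ _ _).mp hz with rfl | hz
      · exact hyx
      · exact hy z hz

lemma pvPairwise_sorted2 (L : List (Int × String)) :
    (PySem.List.sorted2 L (fun p => p.1) (fun p => p.2) false).Pairwise (fun a b => a.1 ≤ b.1) := by
  rw [pvSorted2_eq]
  suffices h : ∀ acc : List (Int × String), acc.Pairwise (fun a b => a.1 ≤ b.1) →
      (L.foldl (fun acc x => PySem.List.insertBy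
        (fun a b => decide (a.1 < b.1) || (!decide (b.1 < a.1) && decide (a.2 < b.2))) x acc) acc).Pairwise
        (fun a b => a.1 ≤ b.1) by
    exact h [] (by simp)
  induction L with
  | nil => intro acc hacc; simpa using hacc
  | cons x t ih =>
    intro acc hacc
    exact ih _ (pvPairwise_insertBy x acc hacc)

-- a predicate with count 1 pins down its member
lemma pvCountP_one_unique {L : List (Int × String)} {P : Int × String → Bool}
    (h : L.countP P = 1) {a b : Int × String} (ha : a ∈ L) (hPa : P a) (hb : b ∈ L) (hPb : P b) :
    a = b := by
  have ha' : a ∈ L.filter P := List.mem_filter.mpr ⟨ha, hPa⟩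
  have hb' : b ∈ L.filter P := List.mem_filter.mpr ⟨hb, hPb⟩
  have hlen : (L.filter P).length = 1 := by rw [← List.countP_eq_length_filter]; exact h
  rcases List.length_eq_one_iff.mp hlen with ⟨x, hx⟩
  rw [hx] at ha' hb'
  simp at ha' hb'
  rw [ha', hb']

-- ===== VERDICT (by name: the statement is the Claim_ definition above) =====
theorem inn_near_our_py_spec : Claim_equal_inn_near_our_py := by
  intro inn our max_diff _
  unfold Spec_inn_near_our_py inn_near_our_py inn_near_our_py_alt
  by_cases hinn : inn.toList = []
  · simp [hinn]
  · simp only [if_neg hinn]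
    rw [pvA_ms, pvB_fold, List.nil_append]
    set L := (our.filter (pvCond inn max_diff)).map
      (fun o => (pvHamming inn.toList o.toList, o)) with hL
    have hinv := pvInv_foldl L
    rcases hst : L.foldl pvStep (none, 0) with ⟨b, c⟩
    rw [hst] at hinv
    have hperm : (PySem.List.sorted2 L (fun p => p.1) (fun p => p.2) false).Perm L :=
      PySem.List.sorted2_perm L _ _ false
    have hpw := pvPairwise_sorted2 L
    match b, hinv with
    | none, ⟨hLnil, hc⟩ =>
      simp [hLnil]
    | some (m, w), ⟨hmem, hmin, hc⟩ =>
      have hLne : L ≠ [] := by intro h; rw [h] at hmem; exact absurd hmem (List.not_mem_nil)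
      rw [if_neg hLne]
      have hcount : L.countP (fun q => q.1 = m) = c.toNat := by omega
      rcases hs : PySem.List.sorted2 L (fun p => p.1) (fun p => p.2) false with _ | ⟨p, t⟩
      · rw [hs] at hperm
        exact absurd hperm.symm.eq_nil hLne
      · rw [hs] at hperm hpw
        have hpL : p ∈ L := hperm.mem_iff.mp (by simp)
        have hmemS : (m, w) ∈ p :: t := hperm.mem_iff.mpr hmem
        have hpm : p.1 = m := by
          have h1 : m ≤ p.1 := hmin p hpL
          rcases List.mem_cons.mp hmemS with h2 | h2
          · rw [← h2]
          · have h3 : p.1 ≤ m := (List.pairwise_cons.mp hpw).1 _ h2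
            omega
        rcases t with _ | ⟨q, r⟩
        · -- singleton: L = [p]
          have hlen : L.length = 1 := by simpa using hperm.length_eq.symm
          rcases List.length_eq_one_iff.mp hlen with ⟨x, hx⟩
          have hpx : p = x := by rw [hx] at hpL; simpa using hpL
          subst hpx
          rw [hx] at hmem hcount
          have hmw : (m, w) = p := by simpa using hmem
          have hc1 : c = 1 := by
            simp [List.countP_cons, hpm] at hcount
            omega
          rw [hc1]
          simp [← hmw]
        · by_cases hlt : p.1 < q.1
          · have hr : ∀ x ∈ q :: r, ¬ (x.1 = m) := by
              intro x hx
              rcases List.mem_cons.mp hx with rfl | hx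
              · omega
              · have h2 := (List.pairwise_cons.mp (List.pairwise_cons.mp hpw).2).1 x hx
                omega
            have hcount1 : (p :: q :: r).countP (fun x => x.1 = m) = 1 := by
              rw [List.countP_cons]
              have h0 : (q :: r).countP (fun x => x.1 = m) = 0 :=
                List.countP_eq_zero.mpr (by intro x hx; simpa using hr x hx)
              simp [h0, hpm]
            have hcL : L.countP (fun q => q.1 = m) = 1 := by
              rw [← hperm.countP_eq]; exact hcount1
            have hc1 : c = 1 := by omega
            have hpw' : p = (m, w) :=
              pvCountP_one_unique hcL hpL (by simp [hpm]) hmem (by simp)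
            have hlt' : m < q.1 := by omega
            simp [hpw', hlt', hc1]
          · have hqL : q ∈ L := hperm.mem_iff.mp (by simp)
            have hqm : q.1 = m := by
              have h1 := hmin q hqL
              have h2 := (List.pairwise_cons.mp hpw).1 q (by simp)
              omega
            have hcount2 : 2 ≤ (p :: q :: r).countP (fun x => x.1 = m) := by
              rw [List.countP_cons, List.countP_cons]
              simp [hpm, hqm]
            have hne1 : ¬ c = 1 := by
              rw [← hperm.countP_eq] at hcount
              omega
            simp [hlt, hne1]
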